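-- pv_equiv track=rewrite | github.com/HolmesProcessing/archive-Holmes-Totem-Service-Library | python3/services/inputtype.py | __isDomainName
-- ===== SOURCE A (Python) =====
-- def __isDomainName(s):
--     # Ported from golang standard package net:
--     # https://golang.org/src/net/dnsclient.go?m=text
--     # See RFC 1035, RFC 3696.
--     # Expectes a ASCII (byte) string (ensure this with a call to is_ascii(s))
--     if len(s) == 0 or len(s) > 255:
--         return False
--
--     last = '.'
--     ok = False # Ok once we've seen a letter.
--     partlen = 0
--     i = 0
--     containsDot = False
--     while i < len(s):
--         c = s[i]
--         i += 1
--
--         if ('a' <= c and c <= 'z') or ('A' <= c and c <= 'Z') or c == '_':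
--             ok = True
--             partlen += 1
--
--         elif '0' <= c and c <= '9':
--             # TODO: check code here
--             # here's probably missing a `if not ok: return False` to avoid
--             # labels starting with numbers
--             # see rfc https://tools.ietf.org/html/rfc1035 page 8
--             partlen += 1
--
--         elif c == '-':
--             if last == '.':
--                 return False
--             partlen += 1
--
--         elif c == '.':
--             if last == '.' or last == '-':
--                 return False
--             if partlen > 63 or partlen == 0:
--                 return False
--             partlen = 0
--             containsDot = True  # modification to indicate that we have more than just one label
--             # here's probably missing a `ok = False` to avoid labels starting
--             # with numbers
--             # see rfc https://tools.ietf.org/html/rfc1035 page 8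
--
--         else:
--             return False
--
--         last = c
--
--     if last == '-' or partlen > 63:
--         return False
--     return ok and containsDot
-- ===== SOURCE B (Python) =====
-- def __isDomainName(s):
--     # Split-based validation: check the dot-separated labels directly
--     # instead of simulating a character automaton.
--     if len(s) == 0 or len(s) > 255:
--         return False
--     parts = s.split('.')
--     n = len(parts)
--     for idx, part in enumerate(parts):
--         if part == '':
--             if idx == n - 1 and idx > 0:
--                 continue  # an empty final label (name ending in a dot) is allowed
--             return False
--         if len(part) > 63:
--             return False
--         if part[0] == '-' or part[-1] == '-':
--             return False
--         for c in part:
--             if not (('0' <= c <= '9') or ('a' <= c <= 'z') or ('A' <= c <= 'Z') or c == '-' or c == '_'):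
--                 return False
--     ok = any(('a' <= c <= 'z') or ('A' <= c <= 'Z') or c == '_' for c in s)
--     return ok and n > 1
-- ===== Notes on version B (the rewrite author's own statement) =====
-- stated objective: simpler
-- what changed: Replaced the character-automaton loop (tracking last char, partlen, ok, containsDot) by splitting the string into dot-separated labels and validating each label directly (length, hyphen ends, allowed chars, empty only as final label), with a separate any-letter pass.
import Mathlib
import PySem

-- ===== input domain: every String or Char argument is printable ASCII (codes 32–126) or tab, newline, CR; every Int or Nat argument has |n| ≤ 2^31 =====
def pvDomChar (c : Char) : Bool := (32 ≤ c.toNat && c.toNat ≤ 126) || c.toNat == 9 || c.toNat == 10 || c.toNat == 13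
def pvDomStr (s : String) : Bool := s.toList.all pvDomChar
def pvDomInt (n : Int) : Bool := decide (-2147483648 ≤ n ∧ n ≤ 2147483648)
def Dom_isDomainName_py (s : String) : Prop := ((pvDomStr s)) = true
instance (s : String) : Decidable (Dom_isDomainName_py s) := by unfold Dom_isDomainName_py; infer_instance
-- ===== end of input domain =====

-- B replaces A's character automaton by splitting on '.' and validating each label directly (simpler decomposition, same O(n) cost).

-- ===== PORT A =====
-- A's while loop over the characters, carried state (last, ok, partlen, containsDot); early `return False` becomes `false`.
def pvGoA : List Char → Char → Bool → Nat → Bool → Bool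
  | [], last, ok, plen, dot =>
    if last = '-' ∨ plen > 63 then false else ok && dot
  | c :: rest, last, ok, plen, dot =>
    if ('a' ≤ c ∧ c ≤ 'z') ∨ ('A' ≤ c ∧ c ≤ 'Z') ∨ c = '_' then
      pvGoA rest c true (plen + 1) dot
    else if '0' ≤ c ∧ c ≤ '9' then
      pvGoA rest c ok (plen + 1) dot
    else if c = '-' then
      if last = '.' then false else pvGoA rest c ok (plen + 1) dot
    else if c = '.' then
      if last = '.' ∨ last = '-' then false
      else if plen > 63 ∨ plen = 0 then false
      else pvGoA rest '.' ok 0 true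
    else false

def isDomainName_py (s : String) : Bool :=
  if s.toList.length = 0 ∨ s.toList.length > 255 then false
  else pvGoA s.toList '.' false 0 false

-- ===== PORT B =====
-- hand port of s.split('.') (exact: Python's str.split with a separator)
def pvSplitDot : List Char → List (List Char)
  | [] => [[]]
  | c :: cs =>
    if c = '.' then [] :: pvSplitDot cs
    else
      match pvSplitDot cs with
      | [] => [[c]]
      | p :: ps => (c :: p) :: ps

def pvLabelChar (c : Char) : Bool :=
  decide (('0' ≤ c ∧ c ≤ '9') ∨ ('a' ≤ c ∧ c ≤ 'z') ∨ ('A' ≤ c ∧ c ≤ 'Z') ∨ c = '-' ∨ c = '_')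

-- Source B's per-label checks for a non-empty label (length, hyphen ends, allowed chars)
def pvLabelOK : List Char → Bool
  | [] => false
  | c :: rest =>
    if (c :: rest).length > 63 then false
    else if c = '-' ∨ (c :: rest).getLast (by simp) = '-' then false
    else (c :: rest).all pvLabelChar

-- Source B's loop over enumerate(parts); `first` tells whether idx = 0 (an empty label is allowed only last and not first)
def pvParts : Bool → List (List Char) → Bool
  | _, [] => true
  | first, [p] => if p = [] then !first else pvLabelOK p
  | _, p :: ps => pvLabelOK p && pvParts false ps

def pvLetterU (c : Char) : Bool :=
  decide (('a' ≤ c ∧ c ≤ 'z') ∨ ('A' ≤ c ∧ c ≤ 'Z') ∨ c = '_')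

def isDomainName_py_alt (s : String) : Bool :=
  if s.toList.length = 0 ∨ s.toList.length > 255 then false
  else
    pvParts true (pvSplitDot s.toList) &&
      (s.toList.any pvLetterU && decide ((pvSplitDot s.toList).length > 1))

-- ===== PRECONDITION & SPEC =====
def Spec_isDomainName_py (s : String) (out : Bool) : Prop := out = isDomainName_py_alt s
instance (s : String) (out : Bool) : Decidable (Spec_isDomainName_py s out) := by unfold Spec_isDomainName_py; infer_instance

-- ===== CLAIM (what is proved, stated in full; the proofs are below) =====
def Claim_equal_isDomainName_py : Prop := ∀ (s : String), Dom_isDomainName_py s → Spec_isDomainName_py s (isDomainName_py s)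

-- ===== LEMMAS AND PROOFS =====

-- A's automaton restated over the list of dot-separated parts (proof-side bridge)
def pvChk : Char → Nat → List (List Char) → Bool
  | _, _, [] => true
  | last, plen, [] :: [] =>
    if last = '-' ∨ plen > 63 then false else true
  | last, plen, [] :: q :: qs =>
    if last = '.' ∨ last = '-' then false
    else if plen > 63 ∨ plen = 0 then false
    else pvChk '.' 0 (q :: qs)
  | last, plen, (c :: p) :: ps =>
    if ('a' ≤ c ∧ c ≤ 'z') ∨ ('A' ≤ c ∧ c ≤ 'Z') ∨ c = '_' then pvChk c (plen + 1) (p :: ps)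
    else if '0' ≤ c ∧ c ≤ '9' then pvChk c (plen + 1) (p :: ps)
    else if c = '-' then
      if last = '.' then false else pvChk c (plen + 1) (p :: ps)
    else false
termination_by _ _ ps => (ps.length, (ps.headD []).length)

def pvAllowedA (c : Char) : Bool :=
  decide (('a' ≤ c ∧ c ≤ 'z') ∨ ('A' ≤ c ∧ c ≤ 'Z') ∨ c = '_' ∨ ('0' ≤ c ∧ c ≤ '9') ∨ c = '-')

def pvHeadOK (last : Char) : List Char → Bool
  | [] => true
  | c :: _ => if c = '-' then !(last == '.') else true

def pvTail (l : Char) (n : Nat) : List (List Char) → Bool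
  | [] => if l = '-' ∨ n > 63 then false else true
  | q :: qs =>
    if l = '.' ∨ l = '-' then false
    else if n > 63 ∨ n = 0 then false
    else pvChk '.' 0 (q :: qs)

lemma pvSplitDot_ne_nil (cs : List Char) : pvSplitDot cs ≠ [] := by
  match cs with
  | [] => simp [pvSplitDot]
  | c :: cs =>
    by_cases h : c = '.'
    · simp [pvSplitDot, h]
    · simp only [pvSplitDot, if_neg h]
      rcases hs : pvSplitDot cs with _ | ⟨p, ps⟩ <;> simp

lemma pvL1 (cs : List Char) : ∀ last ok plen dot,
    pvGoA cs last ok plen dot =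
      (pvChk last plen (pvSplitDot cs) &&
        ((ok || cs.any pvLetterU) && (dot || cs.any (fun c => c == '.')))) := by
  induction cs with
  | nil =>
    intro last ok plen dot
    by_cases h : last = '-' ∨ plen > 63 <;>
      simp [pvGoA, pvSplitDot, pvChk, h]
  | cons c cs ih =>
    intro last ok plen dot
    rcases hs : pvSplitDot cs with _ | ⟨p, ps⟩
    · exact absurd hs (pvSplitDot_ne_nil cs)
    by_cases h1 : ('a' ≤ c ∧ c ≤ 'z') ∨ ('A' ≤ c ∧ c ≤ 'Z') ∨ c = '_'
    · have hc : c ≠ '.' := by rintro rfl; revert h1; decide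
      have hcb : (c == '.') = false := by simpa using hc
      have hl : pvLetterU c = true := by simp [pvLetterU, h1]
      simp only [pvGoA, if_pos h1, pvSplitDot, if_neg hc, hs, pvChk, if_pos h1,
        List.any_cons, hl, ih]
      simp [hcb]
    by_cases h2 : '0' ≤ c ∧ c ≤ '9'
    · have hc : c ≠ '.' := by rcases h2 with ⟨a, b⟩; rintro rfl; revert a b; decide
      have hcb : (c == '.') = false := by simpa using hc
      have hl : pvLetterU c = false := by
        simp only [pvLetterU, decide_eq_false_iff_not]; rintro (h | h | h) <;> exact h1 (by tauto)
      simp only [pvGoA, if_neg h1, if_pos h2, pvSplitDot, if_neg hc, hs, pvChk,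
        List.any_cons, hl, ih]
      simp [hcb]
    by_cases h3 : c = '-'
    · have hc : c ≠ '.' := by rw [h3]; decide
      have hcb : (c == '.') = false := by simpa using hc
      have hl : pvLetterU c = false := by rw [h3]; decide
      by_cases h4 : last = '.'
      · simp [pvGoA, if_neg h1, if_neg h2, if_pos h3, h4, pvSplitDot, if_neg hc, hs, pvChk]
      · simp only [pvGoA, if_neg h1, if_neg h2, if_pos h3, if_neg h4, pvSplitDot,
          if_neg hc, hs, pvChk, List.any_cons, hl, ih]
        simp [hcb]
    by_cases h5 : c = '.'
    · subst h5
      by_cases h6 : last = '.' ∨ last = '-'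
      · simp [pvGoA, if_neg h1, if_neg h2, if_neg h3, h6, pvSplitDot, hs, pvChk]
      by_cases h7 : plen > 63 ∨ plen = 0
      · simp [pvGoA, if_neg h1, if_neg h2, if_neg h3, h6, h7, pvSplitDot, hs, pvChk]
      · have hl : pvLetterU '.' = false := by decide
        simp only [pvGoA, if_neg h1, if_neg h2, if_neg h3, if_pos rfl, if_neg h6,
          if_neg h7, pvSplitDot, if_pos rfl, hs, pvChk, List.any_cons, hl, ih]
        simp [pvChk, h6, h7]
    · simp [pvGoA, if_neg h1, if_neg h2, if_neg h3, if_neg h5, pvSplitDot, hs, pvChk]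

lemma pvLpart (p : List Char) : ∀ last plen ps,
    pvChk last plen (p :: ps) =
      (p.all pvAllowedA && (pvHeadOK last p && pvTail (p.getLastD last) (plen + p.length) ps)) := by
  induction p with
  | nil =>
    intro last plen ps
    cases ps <;> simp [pvChk, pvHeadOK, pvTail]
  | cons c p' ih =>
    intro last plen ps
    have hlen : plen + 1 + p'.length = plen + (c :: p').length := by
      simp [List.length_cons]; omega
    by_cases h1 : ('a' ≤ c ∧ c ≤ 'z') ∨ ('A' ≤ c ∧ c ≤ 'Z') ∨ c = '_'
    · have ha : pvAllowedA c = true := by simp only [pvAllowedA, decide_eq_true_iff]; tauto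
      have hc : c ≠ '.' := by rintro rfl; revert h1; decide
      have hnd : c ≠ '-' := by rintro rfl; revert h1; decide
      have hh : pvHeadOK c p' = true := by
        cases p' with
        | nil => simp [pvHeadOK]
        | cons d t => simp only [pvHeadOK]; split <;> simp [hc]
      simp only [pvChk, if_pos h1, ih, List.all_cons, ha, List.getLastD_cons,
        hh, Bool.true_and, hlen]
      simp [pvHeadOK, hnd]
    by_cases h2 : '0' ≤ c ∧ c ≤ '9'
    · have ha : pvAllowedA c = true := by simp only [pvAllowedA, decide_eq_true_iff]; tauto
      have hc : c ≠ '.' := by rcases h2 with ⟨a, b⟩; rintro rfl; revert a b; decide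
      have hnd : c ≠ '-' := by rcases h2 with ⟨a, b⟩; rintro rfl; revert a b; decide
      have hh : pvHeadOK c p' = true := by
        cases p' with
        | nil => simp [pvHeadOK]
        | cons d t => simp only [pvHeadOK]; split <;> simp [hc]
      simp only [pvChk, if_neg h1, if_pos h2, ih, List.all_cons, ha,
        List.getLastD_cons, hh, Bool.true_and, hlen]
      simp [pvHeadOK, hnd]
    by_cases h3 : c = '-'
    · subst h3
      have ha : pvAllowedA '-' = true := by decide
      have hh : pvHeadOK '-' p' = true := by
        cases p' with
        | nil => simp [pvHeadOK]
        | cons d t => simp only [pvHeadOK]; split <;> simp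
      by_cases h4 : last = '.'
      · simp [pvChk, if_neg h1, if_neg h2, h4, pvHeadOK]
      · simp only [pvChk, if_neg h1, if_neg h2, if_pos rfl, if_neg h4, ih, List.all_cons,
          ha, List.getLastD_cons, hh, Bool.true_and, hlen]
        have hb : (last == '.') = false := by simpa using h4
        simp [pvHeadOK, hb]
    · have ha : pvAllowedA c = false := by
        simp only [pvAllowedA, decide_eq_false_iff_not]; tauto
      simp [pvChk, if_neg h1, if_neg h2, if_neg h3, ha]

lemma pvLabelChar_eq_pvAllowedA : pvLabelChar = pvAllowedA := by
  funext c
  simp only [pvLabelChar, pvAllowedA]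
  apply decide_eq_decide.mpr
  tauto

lemma pvAllowedA_ne_dot {c : Char} (h : pvAllowedA c = true) : c ≠ '.' := by
  rintro rfl; exact absurd h (by decide)

lemma pvGetLastD_cons_eq (c : Char) (rest : List Char) :
    (c :: rest).getLastD '.' = (c :: rest).getLast (List.cons_ne_nil c rest) := by
  simp [List.getLastD_eq_getLast?, List.getLast?_eq_some_getLast]

lemma pvGetLastD_cons_eq' (c : Char) (rest : List Char) :
    (c :: rest).getLast?.getD '.' = (c :: rest).getLast (List.cons_ne_nil c rest) := by
  simp [List.getLast?_eq_some_getLast]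

lemma pvL3 : ∀ ps : List (List Char), ps ≠ [] → pvParts false ps = pvChk '.' 0 ps
  | [], h => absurd rfl h
  | [p], _ => by
    cases p with
    | nil => simp [pvParts, pvChk]
    | cons c rest =>
      rw [pvLpart]
      have hch : (c :: rest).all pvLabelChar = (c :: rest).all pvAllowedA := by
        rw [pvLabelChar_eq_pvAllowedA]
      have hgl := pvGetLastD_cons_eq c rest
      have hgl' := pvGetLastD_cons_eq' c rest
      rcases hA : (c :: rest).all pvAllowedA with _ | _
      · simp only [pvParts, pvLabelOK, hch, hA, hgl]
        split_ifs <;> simp_all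
      · by_cases h63 : (c :: rest).length > 63 <;>
          by_cases hcm : c = '-' <;>
          by_cases hgm : (c :: rest).getLast (List.cons_ne_nil c rest) = '-' <;>
          simp [pvParts, pvLabelOK, pvHeadOK, pvTail, hch, hA, hgl, hgl', h63, hcm, hgm] <;>
          omega
  | p :: q :: qs, _ => by
    have ih := pvL3 (q :: qs) (by simp)
    cases p with
    | nil => simp [pvParts, pvLabelOK, pvLpart, pvTail]
    | cons c rest =>
      rw [pvLpart]
      have hch : (c :: rest).all pvLabelChar = (c :: rest).all pvAllowedA := by
        rw [pvLabelChar_eq_pvAllowedA]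
      have hgl := pvGetLastD_cons_eq c rest
      have hgl' := pvGetLastD_cons_eq' c rest
      rcases hA : (c :: rest).all pvAllowedA with _ | _
      · simp only [pvParts, pvLabelOK, hch, hA, hgl]
        split_ifs <;> simp_all
      · have hld : (c :: rest).getLast (List.cons_ne_nil c rest) ≠ '.' :=
          pvAllowedA_ne_dot (List.all_eq_true.mp hA _ (List.getLast_mem (List.cons_ne_nil c rest)))
        by_cases h63 : (c :: rest).length > 63 <;>
          by_cases hcm : c = '-' <;>
          by_cases hgm : (c :: rest).getLast (List.cons_ne_nil c rest) = '-' <;>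
          simp [pvParts, pvLabelOK, pvHeadOK, pvTail, hch, hA, hgl, hgl', h63, hcm, hgm,
            hld, ih] <;>
          omega

lemma pvSplitDot_ne_single_nil {cs : List Char} (h : cs ≠ []) : pvSplitDot cs ≠ [[]] := by
  match cs with
  | [] => exact absurd rfl h
  | c :: cs =>
    by_cases hc : c = '.'
    · simp [pvSplitDot, hc, pvSplitDot_ne_nil cs]
    · simp only [pvSplitDot, if_neg hc]
      rcases hs : pvSplitDot cs with _ | ⟨p, ps⟩ <;> simp

lemma pvPartsTF {ps : List (List Char)} (h : ps ≠ [[]]) : pvParts true ps = pvParts false ps := by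
  match ps with
  | [] => rfl
  | [p] =>
    have hp : p ≠ [] := by rintro rfl; exact h rfl
    simp [pvParts, hp]
  | p :: q :: qs => simp [pvParts]

lemma pvDotCount : ∀ cs : List Char,
    (cs.any fun c => c == '.') = decide ((pvSplitDot cs).length > 1) := by
  intro cs
  induction cs with
  | nil => simp [pvSplitDot]
  | cons c cs ih =>
    by_cases hc : c = '.'
    · have hpos : 0 < (pvSplitDot cs).length :=
        List.length_pos_of_ne_nil (pvSplitDot_ne_nil cs)
      subst hc
      simp only [pvSplitDot, if_pos rfl, List.any_cons, BEq.rfl, Bool.true_or,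
        List.length_cons]
      have : (pvSplitDot cs).length + 1 > 1 := by omega
      simp [this]
    · have hcb : (c == '.') = false := by simpa using hc
      rcases hs : pvSplitDot cs with _ | ⟨p, ps⟩
      · exact absurd hs (pvSplitDot_ne_nil cs)
      simp only [pvSplitDot, if_neg hc, hs, List.any_cons, hcb, Bool.false_or, ih,
        List.length_cons]

-- ===== VERDICT (by name: the statement is the Claim_ definition above) =====
theorem isDomainName_py_spec : Claim_equal_isDomainName_py := by
  intro s _
  unfold Spec_isDomainName_py isDomainName_py isDomainName_py_alt
  by_cases hg : s.toList.length = 0 ∨ s.toList.length > 255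
  · rw [if_pos hg, if_pos hg]
  · have hne : s.toList ≠ [] := by
      intro h; exact hg (Or.inl (by simp [h]))
    rw [if_neg hg, if_neg hg, pvL1, ← pvL3 _ (pvSplitDot_ne_nil _),
      pvPartsTF (pvSplitDot_ne_single_nil hne), pvDotCount]
    simp
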